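-- pv_equiv track=rewrite | github.com/l-wysocki/TD_2020_26411 | LAB09.py | manchester_encode
-- ===== SOURCE A (Python) =====
-- def manchester_encode(clk, ttl):
--     encode = [0]
--     val = 0
--
--     for i in range(len(clk) - 1):
--         if (clk[i] == 1 and clk[i + 1] == 0):
--             if (ttl[i] == 0):
--                 val = 1
--             else:
--                 val = -1
--         elif (clk[i] == 0 and clk[i + 1] == 1):
--             if (ttl[i] == ttl[i + 1]):
--                 val *= -1
--         encode.append(val)
--     return encode
-- ===== SOURCE B (Python) =====
-- def manchester_encode(clk, ttl):
--     # Phase 1: classify each clock transition into an opcode, reading ttl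
--     # only in the branches that need it (same access pattern as the task).
--     ops = []
--     for i in range(len(clk) - 1):
--         if clk[i] == 1 and clk[i + 1] == 0:
--             ops.append(('set', 1 if ttl[i] == 0 else -1))
--         elif clk[i] == 0 and clk[i + 1] == 1 and ttl[i] == ttl[i + 1]:
--             ops.append(('flip', 0))
--         else:
--             ops.append(('keep', 0))
--     # Phase 2: replay the opcodes; no running variable, each element is
--     # derived from the last element of the output built so far.
--     encode = [0]
--     for op, v in ops:
--         if op == 'set':
--             encode.append(v)
--         elif op == 'flip':
--             encode.append(-encode[-1])
--         else:
--             encode.append(encode[-1])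
--     return encode
-- ===== Notes on version B (the rewrite author's own statement) =====
-- stated objective: alternative
-- what changed: B splits the single stateful loop into two phases: a first pass compiles each clock transition into an opcode (set/flip/keep), and a second pass replays the opcodes onto the output list, deriving each element from the list's last element instead of a running val variable.
import Mathlib
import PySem

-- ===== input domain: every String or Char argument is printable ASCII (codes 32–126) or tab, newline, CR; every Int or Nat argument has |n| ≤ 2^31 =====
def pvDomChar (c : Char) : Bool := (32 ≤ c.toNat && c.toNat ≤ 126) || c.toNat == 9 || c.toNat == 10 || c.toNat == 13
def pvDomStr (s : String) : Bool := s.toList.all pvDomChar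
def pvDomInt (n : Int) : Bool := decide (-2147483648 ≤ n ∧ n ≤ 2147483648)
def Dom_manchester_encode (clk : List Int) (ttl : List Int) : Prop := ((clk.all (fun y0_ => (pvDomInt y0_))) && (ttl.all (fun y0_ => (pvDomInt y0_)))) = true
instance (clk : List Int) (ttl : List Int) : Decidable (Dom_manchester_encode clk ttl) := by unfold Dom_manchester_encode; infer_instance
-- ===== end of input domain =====

-- B compiles each clock transition into an opcode list first and then replays the
-- opcodes onto the output, reading its last element instead of keeping a running val
-- (alternative decomposition, same cost).


-- ===== PORT A =====
-- indexing is via pyGetD; Pre_ guarantees every index is in range, so the default is never read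
def stepA (clk : List Int) (ttl : List Int) (st : List Int × Int) (i : Int) : List Int × Int :=
  let val := st.2
  let val' :=
    if PySem.List.pyGetD clk i 0 = 1 ∧ PySem.List.pyGetD clk (i + 1) 0 = 0 then
      if PySem.List.pyGetD ttl i 0 = 0 then 1 else -1
    else if PySem.List.pyGetD clk i 0 = 0 ∧ PySem.List.pyGetD clk (i + 1) 0 = 1 then
      if PySem.List.pyGetD ttl i 0 = PySem.List.pyGetD ttl (i + 1) 0 then val * (-1) else val
    else val
  (st.1 ++ [val'], val')

def manchester_encode (clk : List Int) (ttl : List Int) : List Int :=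
  ((PySem.List.pyRange 0 ((clk.length : Int) - 1) 1).foldl (stepA clk ttl) ([0], 0)).1

-- ===== PORT B =====
def opB (clk : List Int) (ttl : List Int) (i : Int) : String × Int :=
  if PySem.List.pyGetD clk i 0 = 1 ∧ PySem.List.pyGetD clk (i + 1) 0 = 0 then
    ("set", if PySem.List.pyGetD ttl i 0 = 0 then 1 else -1)
  else if PySem.List.pyGetD clk i 0 = 0 ∧ PySem.List.pyGetD clk (i + 1) 0 = 1 ∧
          PySem.List.pyGetD ttl i 0 = PySem.List.pyGetD ttl (i + 1) 0 then
    ("flip", 0)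
  else ("keep", 0)

-- encode[-1]: encode starts as [0] and only grows, so it is never empty and the default is never read
def applyB (encode : List Int) (op : String × Int) : List Int :=
  if op.1 = "set" then encode ++ [op.2]
  else if op.1 = "flip" then encode ++ [-(PySem.List.pyGetD encode (-1) 0)]
  else encode ++ [PySem.List.pyGetD encode (-1) 0]

def manchester_encode_alt (clk : List Int) (ttl : List Int) : List Int :=
  let ops := (PySem.List.pyRange 0 ((clk.length : Int) - 1) 1).map (opB clk ttl)
  ops.foldl applyB [0]

-- ===== PRECONDITION & SPEC =====
-- Pre_ excludes exactly the inputs where the Python A raises IndexError: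
-- a clock transition whose branch reads a ttl index past the end of ttl.
def Pre_manchester_encode (clk : List Int) (ttl : List Int) : Prop :=
  ∀ i < clk.length, i + 1 < clk.length →
    ((clk.getD i 0 = 1 ∧ clk.getD (i + 1) 0 = 0) → i < ttl.length) ∧
    ((clk.getD i 0 = 0 ∧ clk.getD (i + 1) 0 = 1) → i + 1 < ttl.length)
instance (clk : List Int) (ttl : List Int) : Decidable (Pre_manchester_encode clk ttl) := by
  unfold Pre_manchester_encode; infer_instance

def pvWitness_manchester_encode : List Int × List Int := ([1, 0, 0, 1, 1], [0, 0, 1, 1, 0])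

def Spec_manchester_encode (clk : List Int) (ttl : List Int) (out : List Int) : Prop := out = manchester_encode_alt clk ttl
instance (clk : List Int) (ttl : List Int) (out : List Int) : Decidable (Spec_manchester_encode clk ttl out) := by unfold Spec_manchester_encode; infer_instance

-- ===== CLAIM (what is proved, stated in full; the proofs are below) =====
def Claim_equal_manchester_encode : Prop := ∀ (clk : List Int) (ttl : List Int), Dom_manchester_encode clk ttl → Pre_manchester_encode clk ttl → Spec_manchester_encode clk ttl (manchester_encode clk ttl)

-- ===== LEMMAS AND PROOFS =====

-- one fused B-step agrees with one A-step, provided val is the last element of the list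
theorem stepA_eq_applyB (clk ttl : List Int) (enc : List Int) (val : Int) (i : Int)
    (h : PySem.List.pyGetD enc (-1) 0 = val) :
    stepA clk ttl (enc, val) i = (applyB enc (opB clk ttl i),
      PySem.List.pyGetD (applyB enc (opB clk ttl i)) (-1) 0) := by
  simp only [stepA, opB, applyB]
  by_cases h1 : PySem.List.pyGetD clk i 0 = 1 ∧ PySem.List.pyGetD clk (i + 1) 0 = 0
  · simp [h1, PySem.List.pyGetD_neg_one_append_singleton]
  · by_cases h2 : PySem.List.pyGetD clk i 0 = 0 ∧ PySem.List.pyGetD clk (i + 1) 0 = 1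
    · by_cases h3 : PySem.List.pyGetD ttl i 0 = PySem.List.pyGetD ttl (i + 1) 0
      · simp [h2, h3, PySem.List.pyGetD_neg_one_append_singleton, h]
      · simp [h2, h3, PySem.List.pyGetD_neg_one_append_singleton, h]
    · simp only [h1, if_false, PySem.List.pyGetD_neg_one_append_singleton, h]
      split_ifs with hf <;> simp_all

theorem fold_eq (clk ttl : List Int) :
    ∀ (L : List Int) (enc : List Int) (val : Int),
      PySem.List.pyGetD enc (-1) 0 = val →
      (L.foldl (stepA clk ttl) (enc, val)).1 =
        (L.map (opB clk ttl)).foldl applyB enc := by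
  intro L
  induction L with
  | nil => intro enc val _; rfl
  | cons i L ih =>
      intro enc val h
      simp only [List.foldl_cons, List.map_cons]
      rw [stepA_eq_applyB clk ttl enc val i h]
      exact ih _ _ rfl

-- ===== VERDICT (by name: the statement is the Claim_ definition above) =====
theorem manchester_encode_spec : Claim_equal_manchester_encode := by
  intro clk ttl _ _
  unfold Spec_manchester_encode manchester_encode manchester_encode_alt
  exact fold_eq clk ttl _ [0] 0 rfl
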